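-- pv_equiv track=rewrite | github.com/alibaba-damo-academy/Lumos | lumos-1/lumos-1/model/cosmos_tokenizer/create_cosmos_codebook.py | generate_vid_tokens
-- ===== SOURCE A (Python) =====
-- def generate_vid_tokens(total_toks, token_start = "VIDVID", token_end = "Z"):
--     toks_list = list(range(0, total_toks))
--     toks_list = [str(t) for t in toks_list]
--
--     vid_tkn_chr_mapping = {chr(ord("A") + i): str(i) for i in range(10)}
--     # output: {'A': '0', 'B': '1', 'C': '2', 'D': '3', 'E': '4', 'F': '5', 'G': '6', 'H': '7', 'I': '8', 'J': '9'}
--     chr_vid_tkn_mapping = {j:i for i,j in vid_tkn_chr_mapping.items()}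
--
--     def remap(old_name: str) -> str:
--         return "".join(chr_vid_tkn_mapping.get(c, c) for c in old_name)
--
--     toks_list = [f"{token_start}{remap(t)}{token_end}" for t in toks_list]
--
--     return toks_list
-- ===== SOURCE B (Python) =====
-- def generate_vid_tokens(total_toks, token_start="VIDVID", token_end="Z"):
--     def letters(n):
--         if n == 0:
--             return "A"
--         s = ""
--         while n > 0:
--             s = chr(ord("A") + n % 10) + s
--             n //= 10
--         return s
--     return [token_start + letters(t) + token_end for t in range(total_toks)]
-- ===== Notes on version B (the rewrite author's own statement) =====
-- stated objective: simpler
-- what changed: B drops the two dict comprehensions and the str()+per-character remap entirely and produces each letter string directly by base-10 digit extraction (prepend chr(ord('A')+n%10), n//=10), assembling tokens in one comprehension.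
import Mathlib
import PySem

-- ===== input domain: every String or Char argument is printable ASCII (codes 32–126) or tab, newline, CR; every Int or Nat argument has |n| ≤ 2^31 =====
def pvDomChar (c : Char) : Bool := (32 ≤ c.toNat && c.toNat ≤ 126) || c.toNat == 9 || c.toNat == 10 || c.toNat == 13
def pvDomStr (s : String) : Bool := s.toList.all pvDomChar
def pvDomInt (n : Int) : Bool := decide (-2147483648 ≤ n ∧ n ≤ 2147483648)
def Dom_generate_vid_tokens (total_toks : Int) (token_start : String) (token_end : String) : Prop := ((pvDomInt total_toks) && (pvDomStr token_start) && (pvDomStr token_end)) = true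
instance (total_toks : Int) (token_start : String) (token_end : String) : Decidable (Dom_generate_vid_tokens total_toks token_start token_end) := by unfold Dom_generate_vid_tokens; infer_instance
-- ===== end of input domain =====

-- Header: B builds each letter string by base-10 digit extraction instead of A's
-- str()+dict-lookup remap; objective: simpler (same asymptotic cost).

-- ===== PORT A =====
-- {chr(ord("A") + i): str(i) for i in range(10)}  (Char.ofNat is exact for these codes 65..74)
def pvVidMap : PySem.Dict String String :=
  (PySem.List.pyRange 0 10 1).foldl
    (fun d i => d.insert (String.ofList [Char.ofNat (65 + i.toNat)]) (PySem.Int.toStr i))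
    PySem.Dict.empty

-- {j: i for i, j in vid_tkn_chr_mapping.items()}
def pvChrMap : PySem.Dict String String :=
  pvVidMap.items.foldl (fun d p => d.insert p.2 p.1) PySem.Dict.empty

-- def remap(old_name): return "".join(chr_vid_tkn_mapping.get(c, c) for c in old_name)
def pvRemap (old_name : String) : String :=
  PySem.Str.join "" (old_name.toList.map
    (fun c => pvChrMap.getD (String.ofList [c]) (String.ofList [c])))

def generate_vid_tokens (total_toks : Int) (token_start : String) (token_end : String) : List String :=
  let toks_list := PySem.List.pyRange 0 total_toks 1
  let toks_list := toks_list.map (fun t => PySem.Int.toStr t)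
  toks_list.map (fun t => PySem.Str.join "" [token_start, pvRemap t, token_end])

-- ===== PORT B =====
-- the while loop: s = chr(ord("A") + n % 10) + s; n //= 10
def pvLetters (n : Nat) (acc : List Char) : List Char :=
  if h : n = 0 then acc else pvLetters (n / 10) (Char.ofNat (65 + n % 10) :: acc)
termination_by n
decreasing_by exact Nat.div_lt_self (Nat.pos_of_ne_zero h) (by norm_num)

def pvLetterStr (n : Nat) : String :=
  if n = 0 then "A" else String.ofList (pvLetters n [])

def generate_vid_tokens_alt (total_toks : Int) (token_start : String) (token_end : String) : List String :=
  (PySem.List.pyRange 0 total_toks 1).map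
    (fun t => PySem.Str.join "" [token_start, pvLetterStr t.toNat, token_end])

-- ===== PRECONDITION & SPEC =====
def Spec_generate_vid_tokens (total_toks : Int) (token_start : String) (token_end : String) (out : List String) : Prop := out = generate_vid_tokens_alt total_toks token_start token_end
instance (total_toks : Int) (token_start : String) (token_end : String) (out : List String) : Decidable (Spec_generate_vid_tokens total_toks token_start token_end out) := by unfold Spec_generate_vid_tokens; infer_instance

-- ===== CLAIM (what is proved, stated in full; the proofs are below) =====
def Claim_equal_generate_vid_tokens : Prop := ∀ (total_toks : Int) (token_start : String) (token_end : String), Dom_generate_vid_tokens total_toks token_start token_end → Spec_generate_vid_tokens total_toks token_start token_end (generate_vid_tokens total_toks token_start token_end)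

-- ===== LEMMAS AND PROOFS =====

-- A's per-character lookup sends digitChar d to the letter chr(65+d)
theorem pvLookup_digitChar (d : Nat) (hd : d < 10) :
    pvChrMap.getD (String.ofList [Nat.digitChar d]) (String.ofList [Nat.digitChar d])
      = String.ofList [Char.ofNat (65 + d)] := by
  interval_cases d <;> decide

def pvShift (c : Char) : Char := Char.ofNat (c.toNat + 17)

theorem pvShift_digitChar (d : Nat) (hd : d < 10) :
    pvShift (Nat.digitChar d) = Char.ofNat (65 + d) := by
  interval_cases d <;> decide

theorem pvToDigitsCore_map_shift (fuel : Nat) :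
    ∀ n acc, 0 < n → n ≤ fuel →
      (Nat.toDigitsCore 10 fuel n acc).map pvShift = pvLetters n (acc.map pvShift) := by
  induction fuel with
  | zero => intro n acc h1 h2; omega
  | succ f ih =>
    intro n acc h1 h2
    rw [Nat.toDigitsCore]
    by_cases h : n / 10 = 0
    · rw [if_pos h]
      rw [pvLetters, dif_neg (by omega), h, pvLetters, dif_pos rfl]
      simp [pvShift_digitChar _ (Nat.mod_lt n (by norm_num))]
    · rw [if_neg h]
      have hle : n / 10 ≤ f := by
        have := Nat.div_lt_self h1 (show 1 < 10 by norm_num)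
        omega
      rw [ih (n / 10) _ (Nat.pos_of_ne_zero h) hle]
      conv_rhs => rw [pvLetters]
      rw [dif_neg (show ¬ n = 0 by omega)]
      simp [pvShift_digitChar _ (Nat.mod_lt n (by norm_num))]

-- every char of Nat.toDigits 10 n is digitChar of a digit
theorem pvToDigitsCore_digits (fuel : Nat) :
    ∀ n acc, (∀ c ∈ acc, ∃ d < 10, c = Nat.digitChar d) →
      ∀ c ∈ Nat.toDigitsCore 10 fuel n acc, ∃ d < 10, c = Nat.digitChar d := by
  induction fuel with
  | zero => intro n acc hacc; exact hacc
  | succ f ih =>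
    intro n acc hacc c hc
    rw [Nat.toDigitsCore] at hc
    by_cases h : n / 10 = 0
    · rw [if_pos h] at hc
      rw [List.mem_cons] at hc
      rcases hc with hc | hc
      · exact ⟨n % 10, Nat.mod_lt n (by norm_num), by simp [hc]⟩
      · exact hacc c hc
    · rw [if_neg h] at hc
      refine ih (n / 10) _ ?_ c hc
      intro c' hc'
      rw [List.mem_cons] at hc'
      rcases hc' with hc' | hc'
      · exact ⟨n % 10, Nat.mod_lt n (by norm_num), by simp [hc']⟩
      · exact hacc c' hc'

-- the key per-token fact: remap(str(t)) = letters(t)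
theorem pvRemap_toStr (t : Int) (ht : 0 ≤ t) :
    pvRemap (PySem.Int.toStr t) = pvLetterStr t.toNat := by
  have hts : (PySem.Int.toStr t).toList = Nat.toDigits 10 t.toNat := by
    rw [PySem.Int.toList_toStr, PySem.Int.toChars, if_neg (by omega)]
  unfold pvRemap
  rw [hts]
  have hdig : ∀ c ∈ Nat.toDigits 10 t.toNat, ∃ d < 10, c = Nat.digitChar d :=
    pvToDigitsCore_digits _ _ _ (by simp)
  have hmap : (Nat.toDigits 10 t.toNat).map
      (fun c => pvChrMap.getD (String.ofList [c]) (String.ofList [c]))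
      = (Nat.toDigits 10 t.toNat).map (fun c => String.ofList [pvShift c]) := by
    apply List.map_congr_left
    intro c hc
    obtain ⟨d, hd, rfl⟩ := hdig c hc
    rw [pvLookup_digitChar d hd, pvShift_digitChar d hd]
  rw [hmap]
  by_cases h0 : t.toNat = 0
  · rw [h0]; decide
  · unfold pvLetterStr
    rw [if_neg h0]
    have := pvToDigitsCore_map_shift (t.toNat + 1) t.toNat []
      (Nat.pos_of_ne_zero h0) (by omega)
    simp only [List.map_nil] at this
    rw [show Nat.toDigits 10 t.toNat = Nat.toDigitsCore 10 (t.toNat + 1) t.toNat [] from rfl]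
    rw [show ∀ L : List Char, L.map (fun c => String.ofList [pvShift c])
          = (L.map pvShift).map (fun c => String.ofList [c]) from
        fun L => by rw [List.map_map]; rfl]
    rw [this]
    -- "".join of one-char strings is the char list itself
    apply String.toList_injective
    rw [PySem.Str.toList_join]
    simp only [List.map_map]
    have : (pvLetters t.toNat []).map (String.toList ∘ fun c => String.ofList [c])
        = (pvLetters t.toNat []).map (fun c => [c]) := by
      apply List.map_congr_left; intro c _; simp [Function.comp]
    rw [this]
    simp [PySem.Chars.join_nil_singletons]

-- ===== VERDICT (by name: the statement is the Claim_ definition above) =====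
theorem generate_vid_tokens_spec : Claim_equal_generate_vid_tokens := by
  intro total_toks token_start token_end _
  unfold Spec_generate_vid_tokens generate_vid_tokens generate_vid_tokens_alt
  simp only [List.map_map]
  apply List.map_congr_left
  intro t ht
  have h0 : 0 ≤ t := ((PySem.List.mem_pyRange_one).1 ht).1
  simp [Function.comp, pvRemap_toStr t h0]
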